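-- pv_equiv track=rewrite | github.com/dlas-snoyl/AdventOfCode_21 | day3.py | get_epsilon_value
-- ===== SOURCE A (Python) =====
-- def get_epsilon_array(gammaArray):
--
--     epsilonArray = [0] * len(gammaArray)
--
--     for i in range(len(epsilonArray)):
--         if (gammaArray[i] == 1):
--             epsilonArray[i] = 0
--         else:
--             epsilonArray[i] = 1
--
--     return epsilonArray
--
-- def get_epsilon_value(gammaArray):
--
--     val = 0
--     index = 0
--
--     epsilonArray = get_epsilon_array(gammaArray)
--
--     for i in range(len(epsilonArray)-1, -1, -1):
--         if (epsilonArray[i] == 1):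
--             val += pow(2, index)
--         index += 1
--
--     return val
-- ===== SOURCE B (Python) =====
-- def get_epsilon_value(gammaArray):
--     val = 0
--     for b in gammaArray:
--         val = val * 2 + (0 if b == 1 else 1)
--     return val
-- ===== Notes on version B (the rewrite author's own statement) =====
-- stated objective: simpler
-- what changed: Replaces the helper-built inverted array plus reverse power-indexed loop (a fresh pow(2,index) big-int per set bit) with a single forward Horner pass val = val*2 + (0 if b == 1 else 1).
import Mathlib
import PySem

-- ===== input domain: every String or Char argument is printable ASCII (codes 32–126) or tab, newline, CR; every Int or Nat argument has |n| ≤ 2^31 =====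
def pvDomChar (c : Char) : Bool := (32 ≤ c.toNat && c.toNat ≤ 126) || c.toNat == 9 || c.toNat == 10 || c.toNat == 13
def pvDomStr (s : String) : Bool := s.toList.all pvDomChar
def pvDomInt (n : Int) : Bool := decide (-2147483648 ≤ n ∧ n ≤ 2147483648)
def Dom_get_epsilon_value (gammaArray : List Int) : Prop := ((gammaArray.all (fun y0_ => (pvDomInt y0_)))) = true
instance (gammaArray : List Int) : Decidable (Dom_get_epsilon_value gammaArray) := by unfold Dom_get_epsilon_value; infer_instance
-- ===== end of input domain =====

-- B replaces A's inverted-array helper and reverse pow-indexed loop by one forward Horner pass (objective: simpler).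

-- ===== PORT A =====
-- indices i produced by the ranges are always in range, so pyGetD/pySetD are exact here
def get_epsilon_array (gammaArray : List Int) : List Int :=
  let epsilonArray : List Int := List.replicate gammaArray.length 0
  (PySem.List.pyRange 0 (epsilonArray.length : Int) 1).foldl
    (fun eps i =>
      if PySem.List.pyGetD gammaArray i 0 == 1 then PySem.List.pySetD eps i 0
      else PySem.List.pySetD eps i 1)
    epsilonArray

def get_epsilon_value (gammaArray : List Int) : Int :=
  let epsilonArray := get_epsilon_array gammaArray
  let st := (PySem.List.pyRange ((epsilonArray.length : Int) - 1) (-1) (-1)).foldl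
    (fun (s : Int × Int) i =>
      (if PySem.List.pyGetD epsilonArray i 0 == 1 then s.1 + 2 ^ s.2.toNat else s.1,
       s.2 + 1))
    (0, 0)
  st.1

-- ===== PORT B =====
def get_epsilon_value_alt (gammaArray : List Int) : Int :=
  gammaArray.foldl (fun val b => val * 2 + (if b == 1 then 0 else 1)) 0

-- ===== PRECONDITION & SPEC =====
def Spec_get_epsilon_value (gammaArray : List Int) (out : Int) : Prop := out = get_epsilon_value_alt gammaArray
instance (gammaArray : List Int) (out : Int) : Decidable (Spec_get_epsilon_value gammaArray out) := by unfold Spec_get_epsilon_value; infer_instance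

-- ===== CLAIM (what is proved, stated in full; the proofs are below) =====
def Claim_equal_get_epsilon_value : Prop := ∀ (gammaArray : List Int), Dom_get_epsilon_value gammaArray → Spec_get_epsilon_value gammaArray (get_epsilon_value gammaArray)

-- ===== LEMMAS AND PROOFS =====

-- the inverted bit
def pvBit (b : Int) : Int := if b == 1 then 0 else 1

-- big-endian 0/1 value of a bit list
def pvHorner (xs : List Int) : Int := xs.foldl (fun v b => v * 2 + (if b == 1 then 1 else 0)) 0

theorem pvHorner_append_singleton (xs : List Int) (b : Int) :
    pvHorner (xs ++ [b]) = pvHorner xs * 2 + (if b == 1 then 1 else 0) := by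
  simp [pvHorner]

-- the first loop builds exactly the inverted map
theorem get_epsilon_array_eq (g : List Int) :
    get_epsilon_array g = g.map pvBit := by
  unfold get_epsilon_array
  have key : ∀ (m : Nat), m ≤ g.length →
      ∀ (acc : List Int), acc.length = g.length →
      (PySem.List.pyRange 0 (m : Int) 1).foldl
        (fun eps i =>
          if PySem.List.pyGetD g i 0 == 1 then PySem.List.pySetD eps i 0
          else PySem.List.pySetD eps i 1) acc
      = (g.take m).map pvBit ++ acc.drop m := by
    intro m
    induction m with
    | zero => intro _ acc _; simp [PySem.List.pyRange_one_eq_nil]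
    | succ m ih =>
      intro hm acc hacc
      have hm' : m ≤ g.length := Nat.le_of_succ_le hm
      have hrange : PySem.List.pyRange 0 ((m + 1 : Nat) : Int) 1
          = PySem.List.pyRange 0 (m : Int) 1 ++ [(m : Int)] := by
        have : ((m + 1 : Nat) : Int) = (m : Int) + 1 := by push_cast; ring
        rw [this, PySem.List.pyRange_one_succ_right (by positivity)]
      rw [hrange, List.foldl_append, ih hm' acc hacc]
      have hmlt : m < g.length := hm
      have hmacc : m < ((g.take m).map pvBit ++ acc.drop m).length := by
        simp [hacc]; omega
      have hget : PySem.List.pyGetD g ((m : Nat) : Int) 0 = g[m] :=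
        PySem.List.pyGetD_ofNat _ _ _ hmlt
      have hset : ∀ (v : Int),
          PySem.List.pySetD ((g.take m).map pvBit ++ acc.drop m) ((m : Nat) : Int) v
          = (g.take m).map pvBit ++ v :: (acc.drop m).tail := by
        intro v
        have hlen : ((g.take m).map pvBit).length = m := by simp; omega
        have hdrop : acc.drop m ≠ [] := by
          intro h
          have := congrArg List.length h
          simp [hacc] at this; omega
        rw [PySem.List.pySetD, PySem.List.pySet?_natCast _ _ _ hmacc]
        simp only [Option.getD_some]
        rw [List.set_append]
        simp only [hlen, Nat.sub_self, lt_irrefl]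
        cases h : acc.drop m with
        | nil => exact absurd h hdrop
        | cons a t => simp [List.set]
      have htake : g.take (m + 1) = g.take m ++ [g[m]] := by
        rw [List.take_add_one]
        simp [List.getElem?_eq_getElem hmlt]
      have hdrop1 : acc.drop (m + 1) = (acc.drop m).tail := by
        rw [← List.drop_drop]; simp
      simp only [List.foldl_cons, List.foldl_nil]
      rw [hget]
      have htakemap : List.take (m + 1) (List.map pvBit g)
          = List.take m (List.map pvBit g) ++ [pvBit g[m]] := by
        rw [List.take_add_one]
        simp [List.getElem?_eq_getElem hmlt]
      by_cases hb : g[m] == 1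
      · rw [if_pos hb, hset 0, htake, hdrop1]
        simp [htakemap, pvBit, hb]
      · rw [if_neg hb, hset 1, htake, hdrop1]
        simp [htakemap, pvBit, hb]
  have hlen : (List.replicate g.length (0 : Int)).length = g.length := by simp
  simp only [hlen]
  rw [key g.length le_rfl _ hlen]
  simp

-- the reverse power loop computes the big-endian value of the processed prefix
theorem revloop_eq (eps : List Int) (m : Nat) (hm : m ≤ eps.length) :
    ∀ (val : Int) (idx : Nat),
    ((PySem.List.pyRange ((m : Int) - 1) (-1) (-1)).foldl
      (fun (s : Int × Int) i =>
        (if PySem.List.pyGetD eps i 0 == 1 then s.1 + 2 ^ s.2.toNat else s.1,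
         s.2 + 1))
      (val, (idx : Int))).1
    = val + 2 ^ idx * pvHorner (eps.take m) := by
  induction m with
  | zero =>
    intro val idx
    rw [PySem.List.pyRange_neg_one_eq_nil (by norm_num)]
    simp [pvHorner]
  | succ m ih =>
    intro val idx
    have h1 : ((m + 1 : Nat) : Int) - 1 = (m : Int) := by push_cast; ring
    have hcons : PySem.List.pyRange (m : Int) (-1) (-1)
        = (m : Int) :: PySem.List.pyRange ((m : Int) - 1) (-1) (-1) :=
      PySem.List.pyRange_neg_one_cons (by omega)
    rw [h1, hcons]
    simp only [List.foldl_cons]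
    have hmlt : m < eps.length := hm
    have hget : PySem.List.pyGetD eps ((m : Nat) : Int) 0 = eps[m] :=
      PySem.List.pyGetD_ofNat _ _ _ hmlt
    have hidx : ((idx : Int)).toNat = idx := Int.toNat_natCast idx
    have hidx1 : ((idx : Int)) + 1 = ((idx + 1 : Nat) : Int) := by push_cast; ring
    have htake : eps.take (m + 1) = eps.take m ++ [eps[m]] := by
      rw [List.take_add_one]
      simp [List.getElem?_eq_getElem hmlt]
    rw [hget, hidx]
    by_cases hb : eps[m] == 1
    · simp only [hb, hidx1, ih (Nat.le_of_succ_le hm)]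
      rw [htake, pvHorner_append_singleton]
      simp only [hb, if_true]
      ring
    · simp only [hb, hidx1, ih (Nat.le_of_succ_le hm)]
      rw [htake, pvHorner_append_singleton]
      simp only [hb, Bool.false_eq_true, if_false]
      ring

-- Horner over the inverted bits equals B
theorem pvHorner_map_bit (g : List Int) :
    pvHorner (g.map pvBit) = get_epsilon_value_alt g := by
  unfold pvHorner get_epsilon_value_alt
  rw [List.foldl_map]
  apply PySem.List.foldl_congr_mem
  intro v b _
  by_cases hb : b == 1 <;> simp [pvBit, hb]

-- ===== VERDICT (by name: the statement is the Claim_ definition above) =====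
theorem get_epsilon_value_spec : Claim_equal_get_epsilon_value := by
  intro g _
  unfold Spec_get_epsilon_value get_epsilon_value
  have heps := get_epsilon_array_eq g
  have hlen : (get_epsilon_array g).length = g.length := by rw [heps]; simp
  simp only [hlen]
  have h0 : ((0 : Int), (0 : Int)) = ((0 : Int), ((0 : Nat) : Int)) := by norm_num
  rw [h0, revloop_eq (get_epsilon_array g) g.length (by omega)]
  rw [heps]
  rw [List.take_of_length_le (by simp)]
  simpa using pvHorner_map_bit g
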